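-- pv_equiv track=rewrite | github.com/Emmanuel-MacAnThony/algorithms_with_python | recursion/_study.py | word_split
-- ===== SOURCE A (Python) =====
-- from typing import Set, Iterable
--
-- def word_split(phrase: str, list_of_words: Set[str], output=None):
--
--     if (len(list_of_words) == 0):
--         if (len(phrase) == 0):
--             return output
--         else:
--             return []
--
--     else:
--
--         startIndex = phrase.find(list_of_words[0])
--
--         if startIndex:
--             phrase = phrase[0: startIndex] + phrase[len(list_of_words[0]) + startIndex:]
--             if output == None:
--                 output = []
--             output = [list_of_words[0]] + output
--
--
--         return [] + word_split(phrase, list_of_words[1:], output)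
-- ===== SOURCE B (Python) =====
-- def word_split(phrase, list_of_words, output=None):
--     for word in list_of_words:
--         i = phrase.find(word)
--         if i:
--             phrase = phrase[:i] + phrase[len(word) + i:]
--             output = [word] + (output or [])
--     return [] if phrase else (output or [])
-- ===== Notes on version B (the rewrite author's own statement) =====
-- stated objective: simpler
-- what changed: A's linear recursion with an in-recursion base case and a '[] + recurse' copy at every level becomes a single for-loop over the words followed by one final test of the leftover phrase.
-- outside the precondition, e.g. on word_split('', [], None): A returns None, B returns []; on word_split('', [''], None): A raises TypeError, B returns []
import Mathlib
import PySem

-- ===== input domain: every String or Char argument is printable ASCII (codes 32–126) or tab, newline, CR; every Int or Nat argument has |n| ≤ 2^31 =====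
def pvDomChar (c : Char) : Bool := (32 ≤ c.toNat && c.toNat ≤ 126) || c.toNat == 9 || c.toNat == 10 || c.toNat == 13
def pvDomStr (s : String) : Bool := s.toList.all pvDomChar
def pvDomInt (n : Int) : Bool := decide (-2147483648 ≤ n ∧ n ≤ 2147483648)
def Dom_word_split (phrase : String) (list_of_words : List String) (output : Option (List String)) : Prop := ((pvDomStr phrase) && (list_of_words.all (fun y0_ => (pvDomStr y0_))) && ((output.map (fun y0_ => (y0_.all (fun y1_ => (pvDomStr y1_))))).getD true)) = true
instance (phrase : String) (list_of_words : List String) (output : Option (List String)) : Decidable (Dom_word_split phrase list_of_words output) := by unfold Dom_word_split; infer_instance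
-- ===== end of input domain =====

-- B replaces A's linear recursion (with its per-step `[] + …` copy and in-recursion base case)
-- by a single loop over the words followed by one final test of the leftover phrase; objective: simpler.
-- Where A returns bare None or raises TypeError (excluded by Pre_ below) the ports return a list; nothing is claimed there.

-- ===== PORT A =====
-- phrases are handled as their character lists; wsRecA is A's recursion over list_of_words
def wsRecA (p : List Char) (list_of_words : List String) (output : Option (List String)) : List String :=
  match list_of_words with
  | [] =>
      -- `return output` / `return []`; the None return is outside Pre_word_split, rendered as []
      if p.length = 0 then output.getD [] else []
  | w :: rest =>
      let startIndex := PySem.Chars.find p w.toList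
      if startIndex ≠ 0 then
        let p' := PySem.Chars.slice p (some 0) (some startIndex) ++
                  PySem.Chars.slice p (some ((w.toList.length : Int) + startIndex)) none
        -- `if output == None: output = []` then `output = [w] + output`
        let output' := some (w :: output.getD [])
        [] ++ wsRecA p' rest output'
      else
        [] ++ wsRecA p rest output

def word_split (phrase : String) (list_of_words : List String) (output : Option (List String)) : List String :=
  wsRecA phrase.toList list_of_words output

-- ===== PORT B =====
-- Source B's for-loop as a foldl over the words carrying (phrase, output), then one final return
def wordStep (s : List Char × Option (List String)) (w : String) : List Char × Option (List String) :=
  let i := PySem.Chars.find s.1 w.toList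
  if i ≠ 0 then
    (PySem.Chars.slice s.1 (some 0) (some i) ++
       PySem.Chars.slice s.1 (some ((w.toList.length : Int) + i)) none,
     some (w :: s.2.getD []))
  else s

def word_split_alt (phrase : String) (list_of_words : List String) (output : Option (List String)) : List String :=
  let st := list_of_words.foldl wordStep (phrase.toList, output)
  if st.1.isEmpty then st.2.getD [] else []

-- ===== PRECONDITION & SPEC =====
-- Pre_ excludes exactly the inputs on which A does not return a list: output=None with an empty
-- phrase and only empty words, where A returns bare None (empty word list) or raises TypeError
-- from `[] + None` (nonempty word list).
def Pre_word_split (phrase : String) (list_of_words : List String) (output : Option (List String)) : Prop :=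
  ¬ (output = none ∧ phrase = "" ∧ ∀ w ∈ list_of_words, w = "")

instance (phrase : String) (list_of_words : List String) (output : Option (List String)) : Decidable (Pre_word_split phrase list_of_words output) := by unfold Pre_word_split; infer_instance

def pvWitness_word_split : String × List String × Option (List String) := ("ab cd", ["cd"], some [])

def Spec_word_split (phrase : String) (list_of_words : List String) (output : Option (List String)) (out : List String) : Prop := out = word_split_alt phrase list_of_words output
instance (phrase : String) (list_of_words : List String) (output : Option (List String)) (out : List String) : Decidable (Spec_word_split phrase list_of_words output out) := by unfold Spec_word_split; infer_instance

-- ===== CLAIM (what is proved, stated in full; the proofs are below) =====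
def Claim_equal_word_split : Prop := ∀ (phrase : String) (list_of_words : List String) (output : Option (List String)), Dom_word_split phrase list_of_words output → Pre_word_split phrase list_of_words output → Spec_word_split phrase list_of_words output (word_split phrase list_of_words output)

-- ===== LEMMAS AND PROOFS =====
-- A's recursion computes exactly B's fold-then-test, for every state
theorem wsRecA_eq_fold (list_of_words : List String) :
    ∀ (p : List Char) (output : Option (List String)),
      wsRecA p list_of_words output =
        (let st := list_of_words.foldl wordStep (p, output)
         if st.1.isEmpty then st.2.getD [] else []) := by
  induction list_of_words with
  | nil =>
      intro p output
      simp [wsRecA]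
  | cons w rest ih =>
      intro p output
      simp only [wsRecA, List.foldl_cons, wordStep]
      by_cases h : PySem.Chars.find p w.toList ≠ 0 <;> simp [h, ih]

-- ===== VERDICT (by name: the statement is the Claim_ definition above) =====
theorem word_split_spec : Claim_equal_word_split := by
  intro phrase list_of_words output _ _
  unfold Spec_word_split word_split word_split_alt
  exact wsRecA_eq_fold list_of_words phrase.toList output
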